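-- pv_equiv track=rewrite | github.com/mpereira/interviewing | interviews/junction_boxes.py | ordered_junction_boxes
-- ===== SOURCE A (Python) =====
-- def parse_box(box_string):
--     parts = box_string.split()
--     identifier = parts[0]
--     version = " ".join(parts[1:])
--     return {"identifier": identifier, "version": version}
--
-- def unparse_box(box):
--     return "{} {}".format(box["identifier"], box["version"])
--
-- def is_old_box(box):
--     # Old junction box versions are all alphabetic characters, so checking just
--     # the first should be sufficient.
--     return box["version"][0].isalpha()
--
-- def ordered_junction_boxes(number_of_boxes, box_strings):
--     boxes = [parse_box(b) for b in box_strings]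
--     old_boxes = sorted(
--         (b for b in boxes if is_old_box(b)),
--         key=lambda x: (x["version"], x["identifier"]),
--     )
--     new_boxes = [b for b in boxes if not is_old_box(b)]
--     return [unparse_box(b) for b in old_boxes + new_boxes]
-- ===== SOURCE B (Python) =====
-- def ordered_junction_boxes(number_of_boxes, box_strings):
--     boxes = []
--     for s in box_strings:
--         parts = s.split()
--         boxes.append((parts[0], " ".join(parts[1:])))
--
--     def is_old(box):
--         return box[1][0].isalpha()
--
--     # Radix-style double stable sort instead of partition + sort + concat:
--     # first order by the (version, identifier) key (new boxes all share a
--     # constant sentinel key, so stability keeps their original order), then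
--     # by the old/new flag, which moves old boxes in front of new ones.
--     boxes.sort(key=lambda b: (b[1], b[0]) if is_old(b) else ("", ""))
--     boxes.sort(key=lambda b: 0 if is_old(b) else 1)
--     return ["{} {}".format(i, v) for i, v in boxes]
-- ===== Notes on version B (the rewrite author's own statement) =====
-- stated objective: alternative
-- what changed: Replaces A's explicit old/new partition, separate sort of the old boxes and list concatenation with a radix-style pair of stable sorts over the whole list: first by the (version, identifier) key with a constant sentinel key for new boxes, then by the old/new flag; stability supplies both the new boxes' original order and the final old-before-new arrangement.
import Mathlib
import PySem

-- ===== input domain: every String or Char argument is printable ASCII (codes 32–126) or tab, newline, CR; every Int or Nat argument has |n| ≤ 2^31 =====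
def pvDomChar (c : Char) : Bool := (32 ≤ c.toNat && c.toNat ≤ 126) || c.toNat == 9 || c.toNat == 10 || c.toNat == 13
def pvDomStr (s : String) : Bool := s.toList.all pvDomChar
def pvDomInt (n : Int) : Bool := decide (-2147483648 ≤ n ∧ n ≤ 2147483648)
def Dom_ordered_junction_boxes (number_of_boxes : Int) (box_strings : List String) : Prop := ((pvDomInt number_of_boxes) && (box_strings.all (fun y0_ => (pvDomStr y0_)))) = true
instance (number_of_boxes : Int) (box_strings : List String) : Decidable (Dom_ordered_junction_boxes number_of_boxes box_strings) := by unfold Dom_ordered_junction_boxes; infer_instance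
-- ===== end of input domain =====

-- B replaces A's partition + separate sort + concatenation by two stable sorts of the
-- whole list (radix style: secondary (version, identifier) key with a constant sentinel
-- for new boxes, then the old/new flag); objective: alternative decomposition, same cost.

-- ===== PORT A =====
-- parse_box: parts[0] raises IndexError when the string has no words (excluded by Pre_;
-- the port returns "" there); parts[1:] is List.drop 1 (exact for this nonnegative slice).
def pvParseBox (s : String) : String × String :=
  let parts := PySem.Str.split₀ s
  ((PySem.List.pyGet? parts 0).getD "", PySem.Str.join " " (parts.drop 1))

-- is_old_box: box["version"][0] raises IndexError when the version is empty (excluded by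
-- Pre_; the port returns false there).
def pvIsOldBox (b : String × String) : Bool :=
  match PySem.Str.pyGet? b.2 0 with
  | some c => PySem.Chars.isalpha c
  | none => false

-- unparse_box: "{} {}".format(identifier, version)
def pvUnparseBox (b : String × String) : String := PySem.Str.join " " [b.1, b.2]

def ordered_junction_boxes (number_of_boxes : Int) (box_strings : List String) : List String :=
  let boxes := box_strings.map pvParseBox
  let old_boxes := PySem.List.sorted2 (boxes.filter pvIsOldBox) (fun x => x.2) (fun x => x.1)
  let new_boxes := boxes.filter (fun b => !pvIsOldBox b)
  (old_boxes ++ new_boxes).map pvUnparseBox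

-- ===== PORT B =====
-- is_old (same partiality as A's is_old_box: false stands for the excluded IndexError)
def pvAltIsOld (b : String × String) : Bool :=
  match PySem.Str.pyGet? b.2 0 with
  | some c => PySem.Chars.isalpha c
  | none => false

def ordered_junction_boxes_alt (number_of_boxes : Int) (box_strings : List String) : List String :=
  let boxes := box_strings.foldl (fun acc s =>
    let parts := PySem.Str.split₀ s
    acc ++ [((PySem.List.pyGet? parts 0).getD "", PySem.Str.join " " (parts.drop 1))]) []
  let pass1 := PySem.List.sorted2 boxes
    (fun b => if pvAltIsOld b then b.2 else "") (fun b => if pvAltIsOld b then b.1 else "")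
  let pass2 := PySem.List.sorted pass1 (fun b => if pvAltIsOld b then (0 : Nat) else 1)
  pass2.map (fun b => PySem.Str.join " " [b.1, b.2])

-- ===== PRECONDITION & SPEC =====
-- Pre_ excludes exactly the inputs where Python A raises IndexError: a box string with
-- fewer than two whitespace-separated words (no identifier, or an empty version).
def Pre_ordered_junction_boxes (number_of_boxes : Int) (box_strings : List String) : Prop :=
  ∀ s ∈ box_strings, 2 ≤ (PySem.Str.split₀ s).length
instance (number_of_boxes : Int) (box_strings : List String) : Decidable (Pre_ordered_junction_boxes number_of_boxes box_strings) := by unfold Pre_ordered_junction_boxes; infer_instance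

def pvWitness_ordered_junction_boxes : Int × List String := (3, ["b2 XA", "b1 XA", "b3 12"])

def Spec_ordered_junction_boxes (number_of_boxes : Int) (box_strings : List String) (out : List String) : Prop := out = ordered_junction_boxes_alt number_of_boxes box_strings
instance (number_of_boxes : Int) (box_strings : List String) (out : List String) : Decidable (Spec_ordered_junction_boxes number_of_boxes box_strings out) := by unfold Spec_ordered_junction_boxes; infer_instance

-- ===== CLAIM (what is proved, stated in full; the proofs are below) =====
def Claim_equal_ordered_junction_boxes : Prop := ∀ (number_of_boxes : Int) (box_strings : List String), Dom_ordered_junction_boxes number_of_boxes box_strings → Pre_ordered_junction_boxes number_of_boxes box_strings → Spec_ordered_junction_boxes number_of_boxes box_strings (ordered_junction_boxes number_of_boxes box_strings)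

-- ===== LEMMAS AND PROOFS =====

theorem pvIsOld_eq : pvIsOldBox = pvAltIsOld := rfl

-- old boxes have a nonempty version string
theorem pvOld_snd_ne (b : String × String) (h : pvAltIsOld b = true) : b.2 ≠ "" := by
  intro he
  rw [pvAltIsOld, he] at h
  simp [PySem.Str.pyGet?, PySem.Chars.pyGet?, PySem.List.pyGet?, PySem.List.pyIdx?] at h

theorem pvNot_lt_empty (s : String) : ¬ s < "" := by
  rw [String.lt_iff_toList_lt]
  simp

theorem pvEmpty_lt (s : String) (h : s ≠ "") : ("" : String) < s := by
  rw [String.lt_iff_toList_lt]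
  cases hs : s.toList with
  | nil => exact absurd (by simpa using congrArg String.ofList hs) h
  | cons c cs => exact List.nil_lt_cons c cs

-- the comparison functions of the three insertion sorts involved
def pvBfA (a b : String × String) : Bool :=
  decide (a.2 < b.2) || (!decide (b.2 < a.2) && decide (a.1 < b.1))
def pvBf2 (a b : String × String) : Bool :=
  decide ((if pvAltIsOld a then a.2 else "") < (if pvAltIsOld b then b.2 else "")) ||
    (!decide ((if pvAltIsOld b then b.2 else "") < (if pvAltIsOld a then a.2 else "")) &&
      decide ((if pvAltIsOld a then a.1 else "") < (if pvAltIsOld b then b.1 else "")))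
def pvBfF (a b : String × String) : Bool :=
  decide ((if pvAltIsOld a then (0 : Nat) else 1) < (if pvAltIsOld b then (0 : Nat) else 1))

theorem pvSorted2_eq (xs : List (String × String)) :
    PySem.List.sorted2 xs (fun x => x.2) (fun x => x.1) =
      xs.foldl (fun acc x => PySem.List.insertBy pvBfA x acc) [] := rfl

theorem pvSorted2_alt_eq (xs : List (String × String)) :
    PySem.List.sorted2 xs (fun b => if pvAltIsOld b then b.2 else "")
        (fun b => if pvAltIsOld b then b.1 else "") =
      xs.foldl (fun acc x => PySem.List.insertBy pvBf2 x acc) [] := rfl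

theorem pvSortedF_eq (xs : List (String × String)) :
    PySem.List.sorted xs (fun b => if pvAltIsOld b then (0 : Nat) else 1) =
      xs.foldl (fun acc x => PySem.List.insertBy pvBfF x acc) [] := rfl

-- generic insertBy facts
theorem pvInsertBy_skip {α : Type} (bf : α → α → Bool) (x : α) (A B : List α)
    (hA : ∀ a ∈ A, bf x a = false) :
    PySem.List.insertBy bf x (A ++ B) = A ++ PySem.List.insertBy bf x B := by
  induction A with
  | nil => rfl
  | cons a A ih =>
      simp only [List.cons_append, PySem.List.insertBy, hA a (by simp)]
      simp only [Bool.false_eq_true, if_false, List.cons.injEq, true_and]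
      exact ih (fun a ha => hA a (by simp [ha]))

theorem pvInsertBy_mid {α : Type} (bf : α → α → Bool) (x : α) (A B : List α)
    (hA : ∀ a ∈ A, bf x a = false) (hB : ∀ b, B.head? = some b → bf x b = true) :
    PySem.List.insertBy bf x (A ++ B) = A ++ x :: B := by
  rw [pvInsertBy_skip bf x A B hA]
  cases B with
  | nil => rfl
  | cons b B => simp [PySem.List.insertBy, hB b rfl]

theorem pvInsertBy_congr {α : Type} (bf bf' : α → α → Bool) (x : α) (B : List α)
    (h : ∀ y ∈ B, bf x y = bf' x y) :
    PySem.List.insertBy bf x B = PySem.List.insertBy bf' x B := by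
  induction B with
  | nil => rfl
  | cons b B ih =>
      simp only [PySem.List.insertBy, h b (by simp)]
      split
      · rfl
      · simp only [List.cons.injEq, true_and]
        exact ih (fun y hy => h y (by simp [hy]))

-- the flag sort is a stable partition
theorem pvFlagFold (xs A B : List (String × String))
    (hA : ∀ a ∈ A, pvAltIsOld a = true) (hB : ∀ b ∈ B, pvAltIsOld b = false) :
    xs.foldl (fun acc x => PySem.List.insertBy pvBfF x acc) (A ++ B) =
      (A ++ xs.filter pvAltIsOld) ++ (B ++ xs.filter (fun b => !pvAltIsOld b)) := by
  induction xs generalizing A B with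
  | nil => simp
  | cons x xs ih =>
      by_cases hx : pvAltIsOld x = true
      · have hstep : PySem.List.insertBy pvBfF x (A ++ B) = (A ++ [x]) ++ B := by
          rw [List.append_assoc]
          apply pvInsertBy_mid
          · intro a ha; simp [pvBfF, hx, hA a ha]
          · intro b hb
            have : b ∈ B := List.mem_of_mem_head? hb
            simp [pvBfF, hx, hB b this]
        have hA' : ∀ a ∈ A ++ [x], pvAltIsOld a = true := by
          intro a ha
          rcases List.mem_append.1 ha with h | h
          · exact hA a h
          · simp at h; subst h; exact hx
        simp only [List.foldl_cons, hstep]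
        rw [ih (A ++ [x]) B hA' hB]
        simp [hx, List.append_assoc]
      · have hx' : pvAltIsOld x = false := by simpa using hx
        have hstep : PySem.List.insertBy pvBfF x (A ++ B) = A ++ (B ++ [x]) := by
          rw [← List.append_assoc]
          apply PySem.List.insertBy_of_forall_not_before
          intro y hy
          rcases List.mem_append.1 hy with h | h
          · simp [pvBfF, hx', hA y h]
          · simp [pvBfF, hx', hB y h]
        have hB' : ∀ b ∈ B ++ [x], pvAltIsOld b = false := by
          intro b hb
          rcases List.mem_append.1 hb with h | h
          · exact hB b h
          · simp at h; subst h; exact hx'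
        simp only [List.foldl_cons, hstep]
        rw [ih A (B ++ [x]) hA hB']
        simp [hx', List.append_assoc]

-- the first pass: new boxes stay in place (in front), old boxes get insertion-sorted
-- by (version, identifier)
theorem pvPass1Fold (xs N O : List (String × String))
    (hN : ∀ b ∈ N, pvAltIsOld b = false) (hO : ∀ b ∈ O, pvAltIsOld b = true) :
    xs.foldl (fun acc x => PySem.List.insertBy pvBf2 x acc) (N ++ O) =
      (N ++ xs.filter (fun b => !pvAltIsOld b)) ++
        (xs.filter pvAltIsOld).foldl (fun acc x => PySem.List.insertBy pvBfA x acc) O := by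
  induction xs generalizing N O with
  | nil => simp
  | cons x xs ih =>
      by_cases hx : pvAltIsOld x = true
      · have hstep : PySem.List.insertBy pvBf2 x (N ++ O) =
            N ++ PySem.List.insertBy pvBfA x O := by
          rw [pvInsertBy_skip pvBf2 x N O (by
            intro n hn
            have h2 := pvOld_snd_ne x hx
            simp only [pvBf2, hx, hN n hn, if_true]
            simp [pvNot_lt_empty x.2, pvNot_lt_empty x.1, pvEmpty_lt x.2 h2])]
          congr 1
          apply pvInsertBy_congr
          intro y hy
          simp [pvBf2, pvBfA, hx, hO y hy]
        have hO' : ∀ b ∈ PySem.List.insertBy pvBfA x O, pvAltIsOld b = true := by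
          intro b hb
          rcases (PySem.List.mem_insertBy pvBfA x b O).1 hb with h | h
          · subst h; exact hx
          · exact hO b h
        simp only [List.foldl_cons, hstep]
        rw [ih N (PySem.List.insertBy pvBfA x O) hN hO']
        simp [hx, List.append_assoc]
      · have hx' : pvAltIsOld x = false := by simpa using hx
        have hstep : PySem.List.insertBy pvBf2 x (N ++ O) = (N ++ [x]) ++ O := by
          rw [List.append_assoc]
          apply pvInsertBy_mid
          · intro n hn
            simp [pvBf2, hx', hN n hn]
          · intro o ho
            have hmem : o ∈ O := List.mem_of_mem_head? ho
            have := pvOld_snd_ne o (hO o hmem)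
            simp [pvBf2, hx', hO o hmem, pvEmpty_lt o.2 this]
        have hN' : ∀ b ∈ N ++ [x], pvAltIsOld b = false := by
          intro b hb
          rcases List.mem_append.1 hb with h | h
          · exact hN b h
          · simp at h; subst h; exact hx'
        simp only [List.foldl_cons, hstep]
        rw [ih (N ++ [x]) O hN' hO]
        simp [hx', List.append_assoc]

-- B's parse loop builds the same list as A's comprehension
theorem pvFoldParse (xs : List String) (acc : List (String × String)) :
    xs.foldl (fun acc s =>
      let parts := PySem.Str.split₀ s
      acc ++ [((PySem.List.pyGet? parts 0).getD "", PySem.Str.join " " (parts.drop 1))]) acc =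
      acc ++ xs.map pvParseBox := by
  induction xs generalizing acc with
  | nil => simp
  | cons x xs ih =>
      simp only [List.foldl_cons]
      rw [ih]
      simp [pvParseBox, List.append_assoc]

theorem pvMemSorted2A (xs : List (String × String)) (y : String × String)
    (hy : y ∈ xs.foldl (fun acc x => PySem.List.insertBy pvBfA x acc) []) : y ∈ xs := by
  rw [← pvSorted2_eq] at hy
  have := PySem.List.sorted2_perm xs (fun x : String × String => x.2) (fun x => x.1) false
  exact this.mem_iff.mp hy

-- ===== VERDICT (by name: the statement is the Claim_ definition above) =====
theorem ordered_junction_boxes_spec : Claim_equal_ordered_junction_boxes := by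
  intro number_of_boxes box_strings _ _
  unfold Spec_ordered_junction_boxes ordered_junction_boxes ordered_junction_boxes_alt
  simp only [pvFoldParse box_strings [], List.nil_append]
  set L := box_strings.map pvParseBox with hL
  rw [pvSorted2_alt_eq]
  -- first pass: sentinel sort = new boxes (in order) then sorted old boxes
  have h1 := pvPass1Fold L [] [] (by simp) (by simp)
  simp only [List.append_nil, List.nil_append] at h1
  rw [h1, pvSortedF_eq]
  -- second pass: stable partition by the flag
  set Os := (L.filter pvAltIsOld).foldl (fun acc x => PySem.List.insertBy pvBfA x acc) []
    with hOs
  have h2 := pvFlagFold (L.filter (fun b => !pvAltIsOld b) ++ Os) [] [] (by simp) (by simp)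
  simp only [List.nil_append, List.append_nil] at h2
  rw [h2]
  have hOsOld : ∀ b ∈ Os, pvAltIsOld b = true := by
    intro b hb
    have := pvMemSorted2A _ b hb
    exact (List.mem_filter.1 this).2
  have hfo : (L.filter (fun b => !pvAltIsOld b) ++ Os).filter pvAltIsOld = Os := by
    rw [List.filter_append]
    have h0 : (L.filter (fun b => !pvAltIsOld b)).filter pvAltIsOld = [] := by
      rw [List.filter_eq_nil_iff]
      intro b hb
      have hb2 := (List.mem_filter.1 hb).2
      simp only [Bool.not_eq_eq_eq_not, Bool.not_true] at hb2
      simp [hb2]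
    rw [h0, List.filter_eq_self.2 hOsOld, List.nil_append]
  have hfn : (L.filter (fun b => !pvAltIsOld b) ++ Os).filter (fun b => !pvAltIsOld b) =
      L.filter (fun b => !pvAltIsOld b) := by
    rw [List.filter_append]
    have h1 : Os.filter (fun b => !pvAltIsOld b) = [] := by
      rw [List.filter_eq_nil_iff]
      intro b hb; simp [hOsOld b hb]
    have h2 : (L.filter (fun b => !pvAltIsOld b)).filter (fun b => !pvAltIsOld b) =
        L.filter (fun b => !pvAltIsOld b) := by
      apply List.filter_eq_self.2
      intro b hb; exact (List.mem_filter.1 hb).2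
    rw [h1, h2, List.append_nil]
  rw [hfo, hfn]
  simp only [pvIsOld_eq]
  rfl
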